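-- pv_equiv track=rewrite | github.com/siran/writing | .scripts/tools/era_factor_heuristic.py | slow_power_cost
-- ===== SOURCE A (Python) =====
-- def slow_power_cost(n: int) -> int:
--     best = n
--     max_b = n.bit_length() + 1
--     for power in range(2, max_b + 1):
--         lo = 2
--         hi = n
--         while lo <= hi:
--             mid = (lo + hi) // 2
--             value = mid**power
--             if value == n:
--                 best = min(best, max(mid, power))
--                 break
--             if value < n:
--                 lo = mid + 1
--             else:
--                 hi = mid - 1
--     return best
-- ===== SOURCE B (Python) =====
-- def slow_power_cost(n: int) -> int:
--     best = n
--     b = 2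
--     while b * b <= n:
--         value = b * b
--         e = 2
--         while value < n:
--             value *= b
--             e += 1
--         if value == n:
--             best = min(best, max(b, e))
--         b += 1
--     return best
-- ===== Notes on version B (the rewrite author's own statement) =====
-- stated objective: simpler
-- what changed: B enumerates bases b with b*b <= n and multiplies upward to locate the exponent, instead of A's per-exponent binary search over the base; no bit_length bound and no binary search are needed.
import Mathlib
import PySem

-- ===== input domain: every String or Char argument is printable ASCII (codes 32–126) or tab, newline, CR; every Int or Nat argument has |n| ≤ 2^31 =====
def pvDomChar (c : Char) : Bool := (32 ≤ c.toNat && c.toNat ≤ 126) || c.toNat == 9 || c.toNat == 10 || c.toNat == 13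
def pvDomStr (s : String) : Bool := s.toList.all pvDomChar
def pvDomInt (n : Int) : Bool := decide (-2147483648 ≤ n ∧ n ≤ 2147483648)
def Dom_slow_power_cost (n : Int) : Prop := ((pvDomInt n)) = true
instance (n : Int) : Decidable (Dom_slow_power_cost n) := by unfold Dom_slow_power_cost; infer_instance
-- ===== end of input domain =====

-- B replaces A's per-exponent binary search over the base by a simpler enumeration of the
-- bases b with b*b ≤ n, multiplying upward to find the exponent; same return value everywhere.

-- ===== PORT A =====

-- A's inner `while lo <= hi` binary-search loop; `mid**power` is `mid ^ power.toNat`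
-- (exact: every call site has power ≥ 2).
def aInner (n power best lo hi : Int) : Int :=
  if h : lo ≤ hi then
    let mid := PySem.Int.floordiv (lo + hi) 2
    let value := mid ^ power.toNat
    if value = n then min best (max mid power)
    else if value < n then aInner n power best (mid + 1) hi
    else aInner n power best lo (mid - 1)
  else best
termination_by (hi + 1 - lo).toNat
decreasing_by
  · have := PySem.Int.floordiv_two_mid_bounds h; omega
  · have := PySem.Int.floordiv_two_mid_bounds h; omega

def slow_power_cost (n : Int) : Int :=
  let max_b : Int := (PySem.Int.bitLength n : Int) + 1
  (PySem.List.pyRange 2 (max_b + 1) 1).foldl (fun best power => aInner n power best 2 n) n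

-- ===== PORT B =====

-- B's inner `while value < n: value *= b; e += 1` loop, returning the final (value, e).
-- The conjuncts `1 ≤ value ∧ 2 ≤ b` are totality guards only: they hold at every call site.
def bInner (n b value e : Int) : Int × Int :=
  if h : value < n ∧ 1 ≤ value ∧ 2 ≤ b then
    bInner n b (value * b) (e + 1)
  else (value, e)
termination_by (n - value).toNat
decreasing_by
  obtain ⟨h1, h2, h3⟩ := h
  have : value < value * b := by nlinarith
  omega

-- B's outer `while b * b <= n` loop.
def bOuter (n best b : Int) : Int :=
  if h : b * b ≤ n then
    let p := bInner n b (b * b) 2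
    bOuter n (if p.1 = n then min best (max b p.2) else best) (b + 1)
  else best
termination_by (n + 1 - b).toNat
decreasing_by
  have hbb : b ≤ b * b := by
    rcases le_or_gt b 0 with h' | h' <;> nlinarith
  omega

def slow_power_cost_alt (n : Int) : Int := bOuter n n 2

-- ===== PRECONDITION & SPEC =====
def Spec_slow_power_cost (n : Int) (out : Int) : Prop := out = slow_power_cost_alt n
instance (n : Int) (out : Int) : Decidable (Spec_slow_power_cost n out) := by unfold Spec_slow_power_cost; infer_instance

-- ===== CLAIM (what is proved, stated in full; the proofs are below) =====
def Claim_equal_slow_power_cost : Prop := ∀ (n : Int), Dom_slow_power_cost n → Spec_slow_power_cost n (slow_power_cost n)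

-- ===== LEMMAS AND PROOFS =====

-- (b, e) is a perfect-power representation of n.
def PvRep (n b e : Int) : Prop := 2 ≤ b ∧ 2 ≤ e ∧ b ^ e.toNat = n

-- Characterisation that pins the common return value: r ≤ n, r is n or a contribution
-- max b e of some representation, and r is below every contribution.
def Good (n r : Int) : Prop :=
  r ≤ n ∧ (r = n ∨ ∃ b e, PvRep n b e ∧ r = max b e) ∧ ∀ b e, PvRep n b e → r ≤ max b e

theorem good_unique {n r1 r2 : Int} (h1 : Good n r1) (h2 : Good n r2) : r1 = r2 := by
  obtain ⟨hle1, hs1, hc1⟩ := h1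
  obtain ⟨hle2, hs2, hc2⟩ := h2
  apply le_antisymm
  · rcases hs2 with h | ⟨b, e, hrep, rfl⟩
    · omega
    · exact hc1 _ _ hrep
  · rcases hs1 with h | ⟨b, e, hrep, rfl⟩
    · omega
    · exact hc2 _ _ hrep

-- base uniqueness: with the exponent fixed, the base of a representation is unique
theorem pow_base_eq {b c : Int} (hb : 0 ≤ b) (hc : 0 ≤ c) {p : Nat} (hp : p ≠ 0)
    (h : b ^ p = c ^ p) : b = c := by
  rcases lt_trichotomy b c with h' | h' | h'
  · have := pow_lt_pow_left₀ h' hb hp; omega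
  · exact h'
  · have := pow_lt_pow_left₀ h' hc hp; omega

-- exponent uniqueness: with the base ≥ 2 fixed, the exponent is unique
theorem pow_exp_eq {b : Int} (hb : 2 ≤ b) {i j : Nat} (h : b ^ i = b ^ j) : i = j := by
  have hnat : b.toNat ^ i = b.toNat ^ j := by
    have hb' : (b.toNat : Int) = b := by omega
    have : ((b.toNat ^ i : Nat) : Int) = ((b.toNat ^ j : Nat) : Int) := by
      push_cast [hb']; exact h
    exact_mod_cast this
  exact Nat.pow_right_injective (by omega) hnat

-- A's binary search: sound (returns best, or min best (max b power) for a representation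
-- base b in [lo, hi]) and complete (finds every representation base in [lo, hi]).
theorem aInner_spec (n power : Int) (hp : 2 ≤ power) :
    ∀ k : Nat, ∀ best lo hi : Int, (hi + 1 - lo).toNat = k → 2 ≤ lo →
      (aInner n power best lo hi = best ∨
        ∃ b, lo ≤ b ∧ b ≤ hi ∧ b ^ power.toNat = n ∧
          aInner n power best lo hi = min best (max b power)) ∧
      (∀ b, lo ≤ b → b ≤ hi → b ^ power.toNat = n →
        aInner n power best lo hi = min best (max b power)) := by
  intro k
  induction k using Nat.strong_induction_on with
  | _ k ih =>
    intro best lo hi hk hlo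
    rw [aInner]
    by_cases h : lo ≤ hi
    · simp only [dif_pos h]
      have hmid := PySem.Int.floordiv_two_mid_bounds h
      set mid := PySem.Int.floordiv (lo + hi) 2 with hmiddef
      have hmid2 : (2:Int) ≤ mid := by omega
      have hpow0 : power.toNat ≠ 0 := by omega
      by_cases hv : mid ^ power.toNat = n
      · simp only [if_pos hv]
        constructor
        · exact Or.inr ⟨mid, by omega, by omega, hv, rfl⟩
        · intro b hb1 hb2 hbn
          have : b = mid := pow_base_eq (by omega) (by omega) hpow0 (by rw [hbn, hv])
          rw [this]
      · simp only [if_neg hv]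
        by_cases hlt : mid ^ power.toNat < n
        · simp only [if_pos hlt]
          have hrec := ih (hi + 1 - (mid + 1)).toNat (by omega) best (mid + 1) hi rfl (by omega)
          constructor
          · rcases hrec.1 with h' | ⟨b, hb1, hb2, hbn, hb⟩
            · exact Or.inl h'
            · exact Or.inr ⟨b, by omega, hb2, hbn, hb⟩
          · intro b hb1 hb2 hbn
            have hble : mid + 1 ≤ b := by
              by_contra hcon
              have : b ^ power.toNat ≤ mid ^ power.toNat :=
                pow_le_pow_left₀ (by omega) (by omega) _
              omega
            exact hrec.2 b hble hb2 hbn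
        · simp only [if_neg hlt]
          have hrec := ih (mid - 1 + 1 - lo).toNat (by omega) best lo (mid - 1) rfl hlo
          constructor
          · rcases hrec.1 with h' | ⟨b, hb1, hb2, hbn, hb⟩
            · exact Or.inl h'
            · exact Or.inr ⟨b, hb1, by omega, hbn, hb⟩
          · intro b hb1 hb2 hbn
            have hble : b ≤ mid - 1 := by
              by_contra hcon
              have : mid ^ power.toNat ≤ b ^ power.toNat :=
                pow_le_pow_left₀ (by omega) (by omega) _
              omega
            exact hrec.2 b hb1 hble hbn
    · simp only [dif_neg h]
      exact ⟨Or.inl (by trivial), fun b hb1 hb2 _ => absurd (le_trans hb1 hb2) h⟩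

-- a representation base is at most n, and its square is at most n
theorem rep_base_bounds {n b e : Int} (h : PvRep n b e) : b * b ≤ n ∧ b ≤ n := by
  obtain ⟨hb, he, hn⟩ := h
  have h2 : b ^ (2:Nat) ≤ b ^ e.toNat := pow_le_pow_right₀ (by omega) (by omega)
  have hbb : b * b = b ^ (2:Nat) := by ring
  have hb2 : b ≤ b * b := by nlinarith
  omega

-- a representation exponent is below A's bit_length bound
theorem rep_exp_lt {n b e : Int} (h : PvRep n b e) :
    e < (PySem.Int.bitLength n : Int) + 2 := by
  obtain ⟨hb, he, hn⟩ := h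
  have h2 : (2:Int) ^ e.toNat ≤ b ^ e.toNat := pow_le_pow_left₀ (by omega) hb _
  have hn0 : 0 < n := by
    have : (0:Int) < 2 ^ e.toNat := by positivity
    omega
  have habs : (n.natAbs : Int) = n := by omega
  have hcast : (((2:Nat) ^ e.toNat : Nat) : Int) = (2:Int) ^ e.toNat := by push_cast; rfl
  have hnat : 2 ^ e.toNat ≤ n.natAbs := by
    have h3 : (((2:Nat) ^ e.toNat : Nat) : Int) ≤ (n.natAbs : Int) := by
      rw [hcast, habs]; omega
    exact_mod_cast h3
  have hlt := PySem.Int.lt_two_pow_bitLength n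
  have he' : e.toNat < PySem.Int.bitLength n := by
    by_contra hcon
    have : 2 ^ PySem.Int.bitLength n ≤ 2 ^ e.toNat := Nat.pow_le_pow_right (by omega) (by omega)
    omega
  omega

-- A's fold over the exponents: the accumulator shrinks, is n-or-a-contribution, and ends
-- below every contribution whose exponent is in the list.
theorem foldA_spec (n : Int) :
    ∀ (P : List Int) (best : Int), (∀ p ∈ P, 2 ≤ p) →
      (P.foldl (fun acc p => aInner n p acc 2 n) best ≤ best) ∧
      (P.foldl (fun acc p => aInner n p acc 2 n) best = best ∨
        ∃ b e, PvRep n b e ∧ P.foldl (fun acc p => aInner n p acc 2 n) best = max b e) ∧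
      (∀ b e, PvRep n b e → e ∈ P →
        P.foldl (fun acc p => aInner n p acc 2 n) best ≤ max b e) := by
  intro P
  induction P with
  | nil => intro best _; exact ⟨le_refl _, Or.inl rfl, by simp⟩
  | cons p P ih =>
    intro best hP
    have hp : 2 ≤ p := hP p (by simp)
    have hspec := aInner_spec n p hp (n + 1 - 2).toNat best 2 n rfl (by omega)
    set best1 := aInner n p best 2 n with hb1
    have hrec := ih best1 (fun q hq => hP q (by simp [hq]))
    simp only [List.foldl_cons, ← hb1]
    refine ⟨?_, ?_, ?_⟩
    · have : best1 ≤ best := by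
        rcases hspec.1 with h | ⟨b, _, _, _, h⟩
        · omega
        · rw [h]; exact min_le_left _ _
      exact le_trans hrec.1 this
    · rcases hrec.2.1 with h | h
      · rw [h]
        rcases hspec.1 with h' | ⟨b, hb2, hbn', hbn, h'⟩
        · exact Or.inl h'
        · rw [h']
          rcases le_total best (max b p) with hm | hm
          · exact Or.inl (min_eq_left hm)
          · exact Or.inr ⟨b, p, ⟨by omega, hp, hbn⟩, min_eq_right hm⟩
      · exact Or.inr h
    · intro b e hrep he
      rcases List.mem_cons.mp he with rfl | he'
      · have hb := rep_base_bounds hrep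
        have : best1 = min best (max b e) :=
          hspec.2 b (by exact hrep.1) (by omega) hrep.2.2
        have : best1 ≤ max b e := by rw [this]; exact min_le_right _ _
        exact le_trans hrec.1 this
      · exact hrec.2.2 b e hrep he'

theorem A_good (n : Int) : Good n (slow_power_cost n) := by
  have hfold := foldA_spec n (PySem.List.pyRange 2 ((PySem.Int.bitLength n : Int) + 1 + 1) 1) n
    (fun p hp => (PySem.List.mem_pyRange_one.mp hp).1)
  unfold slow_power_cost
  refine ⟨hfold.1, ?_, ?_⟩
  · rcases hfold.2.1 with h | ⟨b, e, hrep, h⟩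
    · exact Or.inl h
    · exact Or.inr ⟨b, e, hrep, h⟩
  · intro b e hrep
    refine hfold.2.2 b e hrep (PySem.List.mem_pyRange_one.mpr ⟨hrep.2.1, rep_exp_lt hrep⟩)

-- B's inner loop, started at value = b ^ ee: complete (reaches the representation
-- exponent j exactly, if one exists at or above ee) and sound (value n only at a
-- representation exponent).
theorem bInner_spec (n b : Int) (hb : 2 ≤ b) :
    ∀ k : Nat, ∀ ee : Nat, (n - b ^ ee).toNat = k →
      (∀ j : Nat, ee ≤ j → b ^ j = n → bInner n b (b ^ ee) (ee : Int) = (n, (j : Int))) ∧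
      ((bInner n b (b ^ ee) (ee : Int)).1 = n →
        ∃ j : Nat, ee ≤ j ∧ b ^ j = n ∧ (bInner n b (b ^ ee) (ee : Int)).2 = (j : Int)) := by
  intro k
  induction k using Nat.strong_induction_on with
  | _ k ih =>
    intro ee hk
    have hpos : (1:Int) ≤ b ^ ee := one_le_pow₀ (by omega)
    rw [bInner]
    by_cases h : b ^ ee < n
    · have hguard : b ^ ee < n ∧ 1 ≤ b ^ ee ∧ 2 ≤ b := ⟨h, hpos, hb⟩
      simp only [dif_pos hguard]
      have harg1 : b ^ ee * b = b ^ (ee + 1) := (pow_succ b ee).symm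
      have harg2 : ((ee : Int) + 1) = ((ee + 1 : Nat) : Int) := by push_cast; ring
      rw [harg1, harg2]
      have hpos' : (1:Int) ≤ b ^ (ee + 1) := one_le_pow₀ (by omega)
      have hlt : b ^ ee < b ^ (ee + 1) := by
        calc b ^ ee = b ^ ee * 1 := by ring
        _ < b ^ ee * b := by nlinarith
        _ = b ^ (ee + 1) := harg1
      have hrec := ih (n - b ^ (ee + 1)).toNat (by omega) (ee + 1) rfl
      constructor
      · intro j hj hjn
        have hjne : j ≠ ee := by rintro rfl; omega
        exact hrec.1 j (by omega) hjn
      · intro h1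
        obtain ⟨j, hj1, hj2, hj3⟩ := hrec.2 h1
        exact ⟨j, by omega, hj2, hj3⟩
    · have hguard : ¬(b ^ ee < n ∧ 1 ≤ b ^ ee ∧ 2 ≤ b) := by
        intro hcon; exact h hcon.1
      simp only [dif_neg hguard]
      constructor
      · intro j hj hjn
        have hmono : b ^ ee ≤ b ^ j := pow_le_pow_right₀ (by omega) hj
        have heq : b ^ ee = n := by omega
        have : ee = j := pow_exp_eq hb (by rw [heq, hjn])
        subst this
        exact Prod.ext heq rfl
      · intro h1
        exact ⟨ee, le_refl _, h1, rfl⟩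

-- B's outer loop: same three facts as A's fold, relative to the remaining bases b' ≥ b.
theorem bOuter_spec (n : Int) :
    ∀ k : Nat, ∀ best b : Int, 2 ≤ b → (n + 1 - b).toNat = k →
      (bOuter n best b ≤ best) ∧
      (bOuter n best b = best ∨ ∃ b' e, PvRep n b' e ∧ bOuter n best b = max b' e) ∧
      (∀ b' e, PvRep n b' e → b ≤ b' → bOuter n best b ≤ max b' e) := by
  intro k
  induction k using Nat.strong_induction_on with
  | _ k ih =>
    intro best b hb hk
    rw [bOuter]
    by_cases h : b * b ≤ n
    · simp only [dif_pos h]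
      have hpcall : bInner n b (b * b) 2 = bInner n b (b ^ (2:Nat)) (((2:Nat)) : Int) := by
        norm_num [pow_two]
      rw [hpcall]
      have hble : b ≤ n := by nlinarith
      have hdec : (n + 1 - (b + 1)).toNat < k := by omega
      have hspec := bInner_spec n b hb (n - b ^ (2:Nat)).toNat 2 rfl
      set q := bInner n b (b ^ (2:Nat)) (((2:Nat)) : Int) with hqdef
      set best1 := if q.1 = n then min best (max b q.2) else best with hb1def
      have hrec := ih (n + 1 - (b + 1)).toNat hdec best1 (b + 1) (by omega) rfl
      have hbest1le : best1 ≤ best := by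
        rw [hb1def]; split_ifs with hc
        · exact min_le_left _ _
        · exact le_refl _
      refine ⟨le_trans hrec.1 hbest1le, ?_, ?_⟩
      · rcases hrec.2.1 with h' | h'
        · rw [h', hb1def]
          split_ifs with hc
          · obtain ⟨j, hj1, hj2, hj3⟩ := hspec.2 hc
            rw [hj3]
            rcases le_total best (max b (j : Int)) with hm | hm
            · exact Or.inl (min_eq_left hm)
            · refine Or.inr ⟨b, (j : Int), ⟨hb, by exact_mod_cast hj1, ?_⟩, min_eq_right hm⟩
              rw [Int.toNat_natCast]; exact hj2
          · exact Or.inl rfl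
        · exact Or.inr h'
      · intro b' e hrep hble'
        rcases eq_or_lt_of_le hble' with rfl | hlt
        · -- the representation is at the current base: the inner loop finds it
          obtain ⟨_, he2, hpow⟩ := hrep
          have hfind := hspec.1 e.toNat (by omega) hpow
          have hq1 : q.1 = n := by rw [hfind]
          have hq2 : q.2 = ((e.toNat : Nat) : Int) := by rw [hfind]
          have hetonat : ((e.toNat : Nat) : Int) = e := by omega
          have hstep : best1 ≤ max b e := by
            rw [hb1def, if_pos hq1, hq2, hetonat]
            exact min_le_right _ _
          exact le_trans hrec.1 hstep
        · exact hrec.2.2 b' e hrep (by omega)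
    · simp only [dif_neg h]
      refine ⟨le_refl _, Or.inl (by trivial), ?_⟩
      intro b' e hrep hble'
      have := rep_base_bounds hrep
      have hbb' : b * b ≤ b' * b' := by nlinarith [hrep.1]
      omega

theorem B_good (n : Int) : Good n (slow_power_cost_alt n) := by
  have h := bOuter_spec n (n + 1 - 2).toNat n 2 (by omega) rfl
  unfold slow_power_cost_alt
  exact ⟨h.1, h.2.1, fun b e hrep => h.2.2 b e hrep hrep.1⟩

-- ===== VERDICT (by name: the statement is the Claim_ definition above) =====
theorem slow_power_cost_spec : Claim_equal_slow_power_cost := by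
  intro n _
  unfold Spec_slow_power_cost
  exact good_unique (A_good n) (B_good n)
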